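-- pv_equiv track=rewrite | github.com/sanchit2843/Indian_LPR | src/semantic_segmentation/utils/util.py | upsample_coordinates
-- ===== SOURCE A (Python) =====
-- def convert_poly_to_bbox(x, y):
--     x1 = min(x)
--     x2 = max(x)
--     y1 = min(y)
--     y2 = max(y)
--     bbox = [x1, y1, x2, y2]
--     return bbox
--
-- def convert_coordinates_to_bbox(coordinates):
--     boxes = []
--     for i in coordinates:
--         x, y = convert_x_y_tuple_to_xy_list(i)
--         boxes.append(convert_poly_to_bbox(x, y))
--     return boxes
--
-- def upsample_coordinates(coordinates, prediction_shape, image_shape):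
--     p_h, p_w = prediction_shape
--     i_h, i_w, _ = image_shape
--     coordinates_new = []
--     boxes_new = []
--
--     for c in coordinates:
--         coordinates_new.append(
--             [[int(x[0] * i_w / p_w), int(x[1] * i_h / p_h)] for x in c]
--         )
--     boxes_new = convert_coordinates_to_bbox(coordinates_new)
--     return coordinates_new, boxes_new
--
-- def convert_x_y_tuple_to_xy_list(poly):
--     x = []
--     y = []
--     for i in poly:
--         x.append(i[0])
--         y.append(i[1])
--     return (x, y)
-- ===== SOURCE B (Python) =====
-- def upsample_coordinates(coordinates, prediction_shape, image_shape):
--     p_h, p_w = prediction_shape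
--     i_h, i_w, _ = image_shape
--     coordinates_new = []
--     boxes_new = []
--     for poly in coordinates:
--         sx = int(poly[0][0] * i_w / p_w)
--         sy = int(poly[0][1] * i_h / p_h)
--         scaled = [[sx, sy]]
--         x1 = x2 = sx
--         y1 = y2 = sy
--         for p in poly[1:]:
--             sx = int(p[0] * i_w / p_w)
--             sy = int(p[1] * i_h / p_h)
--             scaled.append([sx, sy])
--             if sx < x1:
--                 x1 = sx
--             if sy < y1:
--                 y1 = sy
--             if sx > x2:
--                 x2 = sx
--             if sy > y2:
--                 y2 = sy
--         coordinates_new.append(scaled)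
--         boxes_new.append([x1, y1, x2, y2])
--     return coordinates_new, boxes_new
-- ===== Notes on version B (the rewrite author's own statement) =====
-- stated objective: simpler
-- what changed: A scales all polygons in one pass, then a second pass rebuilds per-polygon x/y lists through two helper functions and calls min()/max() four times; B does a single fused loop per polygon that scales each point and tracks the running bbox minima/maxima inline, with no helpers and no intermediate x/y lists.
import Mathlib
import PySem

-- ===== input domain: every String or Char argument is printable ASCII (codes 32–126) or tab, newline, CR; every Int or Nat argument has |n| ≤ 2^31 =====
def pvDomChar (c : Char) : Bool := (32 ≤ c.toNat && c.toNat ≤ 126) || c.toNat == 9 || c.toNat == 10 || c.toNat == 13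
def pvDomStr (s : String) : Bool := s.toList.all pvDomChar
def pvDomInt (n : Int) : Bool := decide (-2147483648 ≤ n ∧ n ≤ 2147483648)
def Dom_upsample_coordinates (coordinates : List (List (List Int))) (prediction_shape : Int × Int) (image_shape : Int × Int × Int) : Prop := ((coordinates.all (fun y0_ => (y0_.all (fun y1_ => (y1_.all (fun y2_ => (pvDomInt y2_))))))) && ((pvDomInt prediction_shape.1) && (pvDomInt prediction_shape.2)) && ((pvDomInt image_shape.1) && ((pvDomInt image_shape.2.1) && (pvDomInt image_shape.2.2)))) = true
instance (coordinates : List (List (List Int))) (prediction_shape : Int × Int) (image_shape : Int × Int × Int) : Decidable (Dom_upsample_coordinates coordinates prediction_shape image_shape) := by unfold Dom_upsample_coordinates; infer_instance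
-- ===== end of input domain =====

-- B fuses A's two phases (scale all polygons, then re-scan building x/y lists for min()/max())
-- into one loop per polygon that scales each point and tracks the bbox inline; objective: simpler.

-- Hand port of Python's int(n / m) on ints (PySem has no float primitive): CPython's int/int true
-- division is the correctly rounded (nearest, ties-to-even) IEEE double of the exact rational,
-- and int() truncates it toward zero.  The three helpers below compute exactly that with integer
-- arithmetic; exact for every quotient in the normal double range, which covers all of Dom
-- (|operands| ≤ 2^31, so 2^-31 ≤ |n/m| ≤ 2^62 whenever n ≠ 0, m ≠ 0).
def pvRoundHalfEven (p q : Nat) : Nat :=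
  let d := p / q
  let r := p % q
  if 2 * r < q then d else if q < 2 * r then d + 1 else if d % 2 = 0 then d else d + 1

-- trunc(nearest-double(a / b)) for a > 0, b > 0
def pvFloatQuotTrunc (a b : Nat) : Nat :=
  let k0 : Int := (Nat.log2 a : Int) - (Nat.log2 b : Int)
  let k : Int := if b * 2 ^ k0.toNat ≤ a * 2 ^ (-k0).toNat then k0 else k0 - 1
  let s := pvRoundHalfEven (a * 2 ^ ((52 - k).toNat)) (b * 2 ^ ((k - 52).toNat))
  if 52 ≤ k then s * 2 ^ (k - 52).toNat else s / 2 ^ ((52 - k).toNat)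

-- int(n / m) for m ≠ 0 (both rounding and truncation are sign-symmetric)
def pyIntTrueDiv (n m : Int) : Int :=
  if n = 0 then 0
  else if (decide (n < 0)) ≠ (decide (m < 0)) then -(pvFloatQuotTrunc n.natAbs m.natAbs : Int)
  else (pvFloatQuotTrunc n.natAbs m.natAbs : Int)

-- ===== PORT A =====
def convert_poly_to_bbox (x y : List Int) : List Int :=
  [(PySem.List.min? x (fun v => v)).getD 0, (PySem.List.min? y (fun v => v)).getD 0,
   (PySem.List.max? x (fun v => v)).getD 0, (PySem.List.max? y (fun v => v)).getD 0]

def convert_x_y_tuple_to_xy_list (poly : List (List Int)) : List Int × List Int :=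
  poly.foldl (fun (xy : List Int × List Int) i =>
    (xy.1 ++ [PySem.List.pyGetD i 0 0], xy.2 ++ [PySem.List.pyGetD i 1 0])) ([], [])

def convert_coordinates_to_bbox (coordinates : List (List (List Int))) : List (List Int) :=
  coordinates.foldl (fun boxes i =>
    let xy := convert_x_y_tuple_to_xy_list i
    boxes ++ [convert_poly_to_bbox xy.1 xy.2]) []

def upsample_coordinates (coordinates : List (List (List Int))) (prediction_shape : Int × Int) (image_shape : Int × Int × Int) : List (List (List Int)) × List (List Int) :=
  let p_h := prediction_shape.1
  let p_w := prediction_shape.2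
  let i_h := image_shape.1
  let i_w := image_shape.2.1
  let coordinates_new := coordinates.foldl (fun acc c =>
    acc ++ [c.map (fun x =>
      [pyIntTrueDiv (PySem.List.pyGetD x 0 0 * i_w) p_w,
       pyIntTrueDiv (PySem.List.pyGetD x 1 0 * i_h) p_h])]) []
  (coordinates_new, convert_coordinates_to_bbox coordinates_new)

-- ===== PORT B =====
def upsample_coordinates_alt (coordinates : List (List (List Int))) (prediction_shape : Int × Int) (image_shape : Int × Int × Int) : List (List (List Int)) × List (List Int) :=
  let p_h := prediction_shape.1
  let p_w := prediction_shape.2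
  let i_h := image_shape.1
  let i_w := image_shape.2.1
  coordinates.foldl (fun (acc : List (List (List Int)) × List (List Int)) poly =>
    let p0 := PySem.List.pyGetD poly 0 []
    let sx0 := pyIntTrueDiv (PySem.List.pyGetD p0 0 0 * i_w) p_w
    let sy0 := pyIntTrueDiv (PySem.List.pyGetD p0 1 0 * i_h) p_h
    let st := (poly.drop 1).foldl
      (fun (s : List (List Int) × Int × Int × Int × Int) p =>
        let sx := pyIntTrueDiv (PySem.List.pyGetD p 0 0 * i_w) p_w
        let sy := pyIntTrueDiv (PySem.List.pyGetD p 1 0 * i_h) p_h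
        (s.1 ++ [[sx, sy]],
         if sx < s.2.1 then sx else s.2.1,
         if sy < s.2.2.1 then sy else s.2.2.1,
         if sx > s.2.2.2.1 then sx else s.2.2.2.1,
         if sy > s.2.2.2.2 then sy else s.2.2.2.2))
      ([[sx0, sy0]], sx0, sy0, sx0, sy0)
    (acc.1 ++ [st.1], acc.2 ++ [[st.2.1, st.2.2.1, st.2.2.2.1, st.2.2.2.2]]))
    ([], [])

-- ===== PRECONDITION & SPEC =====
-- Pre_ excludes exactly the inputs on which Python A raises: an empty polygon (ValueError from
-- min() over no points), a point with fewer than 2 entries (IndexError on x[0] / x[1]), and a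
-- zero prediction dimension when there is at least one point to scale (ZeroDivisionError).
def Pre_upsample_coordinates (coordinates : List (List (List Int))) (prediction_shape : Int × Int) (image_shape : Int × Int × Int) : Prop :=
  (coordinates ≠ [] → prediction_shape.1 ≠ 0 ∧ prediction_shape.2 ≠ 0) ∧
  ∀ poly ∈ coordinates, poly ≠ [] ∧ ∀ p ∈ poly, 2 ≤ p.length
instance (coordinates : List (List (List Int))) (prediction_shape : Int × Int) (image_shape : Int × Int × Int) : Decidable (Pre_upsample_coordinates coordinates prediction_shape image_shape) := by unfold Pre_upsample_coordinates; infer_instance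

def pvWitness_upsample_coordinates : List (List (List Int)) × (Int × Int) × (Int × Int × Int) :=
  ([[[2, 3], [-7, 5], [0, 0]], [[10, -4]]], (4, 3), (100, 60, 3))

def Spec_upsample_coordinates (coordinates : List (List (List Int))) (prediction_shape : Int × Int) (image_shape : Int × Int × Int) (out : List (List (List Int)) × List (List Int)) : Prop := out = upsample_coordinates_alt coordinates prediction_shape image_shape
instance (coordinates : List (List (List Int))) (prediction_shape : Int × Int) (image_shape : Int × Int × Int) (out : List (List (List Int)) × List (List Int)) : Decidable (Spec_upsample_coordinates coordinates prediction_shape image_shape out) := by unfold Spec_upsample_coordinates; infer_instance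

-- ===== CLAIM (what is proved, stated in full; the proofs are below) =====
def Claim_equal_upsample_coordinates : Prop := ∀ (coordinates : List (List (List Int))) (prediction_shape : Int × Int) (image_shape : Int × Int × Int), Dom_upsample_coordinates coordinates prediction_shape image_shape → Pre_upsample_coordinates coordinates prediction_shape image_shape → Spec_upsample_coordinates coordinates prediction_shape image_shape (upsample_coordinates coordinates prediction_shape image_shape)

-- ===== LEMMAS AND PROOFS =====

-- proof-only abbreviations: the scaled x / y coordinate, the scaled point, the bbox of a polygon
def pvSX (iw pw : Int) (p : List Int) : Int := pyIntTrueDiv (PySem.List.pyGetD p 0 0 * iw) pw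
def pvSY (ih ph : Int) (p : List Int) : Int := pyIntTrueDiv (PySem.List.pyGetD p 1 0 * ih) ph
def pvG (iw pw ih ph : Int) (p : List Int) : List Int := [pvSX iw pw p, pvSY ih ph p]
def pvBox (iw pw ih ph : Int) (c : List (List Int)) : List Int :=
  [(PySem.List.min? (c.map (pvSX iw pw)) (fun v => v)).getD 0,
   (PySem.List.min? (c.map (pvSY ih ph)) (fun v => v)).getD 0,
   (PySem.List.max? (c.map (pvSX iw pw)) (fun v => v)).getD 0,
   (PySem.List.max? (c.map (pvSY ih ph)) (fun v => v)).getD 0]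

-- A's xy-list builder returns the two coordinate projections.
theorem xy_list_eq (poly : List (List Int)) :
    convert_x_y_tuple_to_xy_list poly =
      (poly.map (fun i => PySem.List.pyGetD i 0 0), poly.map (fun i => PySem.List.pyGetD i 1 0)) := by
  unfold convert_x_y_tuple_to_xy_list
  have h : ∀ (l : List (List Int)) (ax ay : List Int),
      l.foldl (fun (xy : List Int × List Int) i =>
        (xy.1 ++ [PySem.List.pyGetD i 0 0], xy.2 ++ [PySem.List.pyGetD i 1 0])) (ax, ay) =
      (ax ++ l.map (fun i => PySem.List.pyGetD i 0 0), ay ++ l.map (fun i => PySem.List.pyGetD i 1 0)) := by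
    intro l
    induction l with
    | nil => simp
    | cons hd tl ih => intro ax ay; simp [List.foldl_cons, ih]
  simpa using h poly [] []

-- A's bbox of a scaled polygon is pvBox.
theorem bbox_of_scaled (iw pw ih ph : Int) (c : List (List Int)) :
    (let xy := convert_x_y_tuple_to_xy_list (c.map (pvG iw pw ih ph))
     convert_poly_to_bbox xy.1 xy.2) = pvBox iw pw ih ph c := by
  simp [xy_list_eq, convert_poly_to_bbox, pvBox, pvG, List.map_map, Function.comp_def,
    PySem.List.pyGetD]

-- B's inner fold: accumulates the scaled tail and folds min/max over it.
theorem inner_fold_eq (sxf syf : List Int → Int) (l : List (List Int)) :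
    ∀ (acc : List (List Int)) (x1 y1 x2 y2 : Int),
      l.foldl (fun (s : List (List Int) × Int × Int × Int × Int) p =>
        (s.1 ++ [[sxf p, syf p]],
         if sxf p < s.2.1 then sxf p else s.2.1,
         if syf p < s.2.2.1 then syf p else s.2.2.1,
         if sxf p > s.2.2.2.1 then sxf p else s.2.2.2.1,
         if syf p > s.2.2.2.2 then syf p else s.2.2.2.2)) (acc, x1, y1, x2, y2) =
      (acc ++ l.map (fun p => [sxf p, syf p]),
       (l.map sxf).foldl min x1, (l.map syf).foldl min y1,
       (l.map sxf).foldl max x2, (l.map syf).foldl max y2) := by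
  induction l with
  | nil => simp
  | cons hd tl ih =>
    intro acc x1 y1 x2 y2
    have hmin : (if sxf hd < x1 then sxf hd else x1) = min x1 (sxf hd) := by
      rw [min_def]; split_ifs <;> omega
    have hmin2 : (if syf hd < y1 then syf hd else y1) = min y1 (syf hd) := by
      rw [min_def]; split_ifs <;> omega
    have hmax : (if sxf hd > x2 then sxf hd else x2) = max x2 (sxf hd) := by
      rw [max_def]; split_ifs <;> omega
    have hmax2 : (if syf hd > y2 then syf hd else y2) = max y2 (syf hd) := by
      rw [max_def]; split_ifs <;> omega
    simp only [List.foldl_cons, List.map_cons, hmin, hmin2, hmax, hmax2, ih]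
    simp

-- per-polygon: B's body computes A's scaled polygon and its pvBox.
theorem poly_eq (iw pw ih ph : Int) (p0 : List Int) (rest : List (List Int)) :
    (((p0 :: rest).drop 1).foldl (fun (s : List (List Int) × Int × Int × Int × Int) p =>
        (s.1 ++ [[pvSX iw pw p, pvSY ih ph p]],
         if pvSX iw pw p < s.2.1 then pvSX iw pw p else s.2.1,
         if pvSY ih ph p < s.2.2.1 then pvSY ih ph p else s.2.2.1,
         if pvSX iw pw p > s.2.2.2.1 then pvSX iw pw p else s.2.2.2.1,
         if pvSY ih ph p > s.2.2.2.2 then pvSY ih ph p else s.2.2.2.2))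
      ([[pvSX iw pw p0, pvSY ih ph p0]], pvSX iw pw p0, pvSY ih ph p0, pvSX iw pw p0, pvSY ih ph p0)) =
    ((p0 :: rest).map (pvG iw pw ih ph),
     (pvBox iw pw ih ph (p0 :: rest)).getD 0 0,
     (pvBox iw pw ih ph (p0 :: rest)).getD 1 0,
     (pvBox iw pw ih ph (p0 :: rest)).getD 2 0,
     (pvBox iw pw ih ph (p0 :: rest)).getD 3 0) := by
  rw [List.drop_succ_cons, List.drop_zero, inner_fold_eq]
  simp [pvBox, pvG, PySem.List.min?_id_cons, PySem.List.max?_id_cons]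

-- B's outer fold maps each nonempty polygon to its scaled points and its pvBox.
theorem outer_fold_eq (iw pw ihh ph : Int) (cs : List (List (List Int)))
    (h : ∀ poly ∈ cs, poly ≠ []) :
    ∀ (b1 : List (List (List Int))) (b2 : List (List Int)),
    cs.foldl (fun (acc : List (List (List Int)) × List (List Int)) poly =>
      let st := (poly.drop 1).foldl
        (fun (s : List (List Int) × Int × Int × Int × Int) p =>
          (s.1 ++ [[pvSX iw pw p, pvSY ihh ph p]],
           if pvSX iw pw p < s.2.1 then pvSX iw pw p else s.2.1,
           if pvSY ihh ph p < s.2.2.1 then pvSY ihh ph p else s.2.2.1,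
           if pvSX iw pw p > s.2.2.2.1 then pvSX iw pw p else s.2.2.2.1,
           if pvSY ihh ph p > s.2.2.2.2 then pvSY ihh ph p else s.2.2.2.2))
        ([[pvSX iw pw (PySem.List.pyGetD poly 0 []), pvSY ihh ph (PySem.List.pyGetD poly 0 [])]],
         pvSX iw pw (PySem.List.pyGetD poly 0 []), pvSY ihh ph (PySem.List.pyGetD poly 0 []),
         pvSX iw pw (PySem.List.pyGetD poly 0 []), pvSY ihh ph (PySem.List.pyGetD poly 0 []))
      (acc.1 ++ [st.1], acc.2 ++ [[st.2.1, st.2.2.1, st.2.2.2.1, st.2.2.2.2]])) (b1, b2) =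
    (b1 ++ cs.map (fun c => c.map (pvG iw pw ihh ph)), b2 ++ cs.map (pvBox iw pw ihh ph)) := by
  induction cs with
  | nil => simp
  | cons hd tl IH =>
    intro b1 b2
    obtain ⟨p0, rest, rfl⟩ : ∃ p0 rest, hd = p0 :: rest := by
      cases hd with
      | nil => exact absurd rfl (h _ (by simp))
      | cons a b => exact ⟨a, b, rfl⟩
    simp only [List.foldl_cons]
    have hget : PySem.List.pyGetD (p0 :: rest) 0 [] = p0 := by
      simp [PySem.List.pyGetD]
    rw [hget, poly_eq iw pw ihh ph p0 rest,
      IH (fun poly hm => h poly (by simp [hm]))]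
    simp [pvBox]

-- A's second pass over the scaled polygons yields the mapped pvBox.
theorem bbox_map (iw pw ihh ph : Int) (cs : List (List (List Int))) :
    convert_coordinates_to_bbox (cs.map (fun c => c.map (pvG iw pw ihh ph))) =
      cs.map (pvBox iw pw ihh ph) := by
  unfold convert_coordinates_to_bbox
  have h1 := PySem.List.foldl_append_singleton_eq_map
      (fun i => convert_poly_to_bbox (convert_x_y_tuple_to_xy_list i).1
        (convert_x_y_tuple_to_xy_list i).2)
      (cs.map (fun c => c.map (pvG iw pw ihh ph))) []
  rw [List.nil_append] at h1
  have h2 : (cs.map (fun c => c.map (pvG iw pw ihh ph))).map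
      (fun i => convert_poly_to_bbox (convert_x_y_tuple_to_xy_list i).1
        (convert_x_y_tuple_to_xy_list i).2) = cs.map (pvBox iw pw ihh ph) := by
    rw [List.map_map]
    exact List.map_congr_left (fun c _ => bbox_of_scaled iw pw ihh ph c)
  exact h1.trans h2

theorem upsample_coordinates_spec' (coordinates : List (List (List Int))) (prediction_shape : Int × Int) (image_shape : Int × Int × Int)
    (hpre : Pre_upsample_coordinates coordinates prediction_shape image_shape) :
    upsample_coordinates coordinates prediction_shape image_shape =
      upsample_coordinates_alt coordinates prediction_shape image_shape := by
  obtain ⟨-, hpoly⟩ := hpre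
  show (coordinates.foldl (fun acc c =>
          acc ++ [c.map (pvG image_shape.2.1 prediction_shape.2 image_shape.1 prediction_shape.1)]) [],
        convert_coordinates_to_bbox (coordinates.foldl (fun acc c =>
          acc ++ [c.map (pvG image_shape.2.1 prediction_shape.2 image_shape.1 prediction_shape.1)]) [])) =
      coordinates.foldl (fun (acc : List (List (List Int)) × List (List Int)) poly =>
        let st := (poly.drop 1).foldl
          (fun (s : List (List Int) × Int × Int × Int × Int) p =>
            (s.1 ++ [[pvSX image_shape.2.1 prediction_shape.2 p, pvSY image_shape.1 prediction_shape.1 p]],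
             if pvSX image_shape.2.1 prediction_shape.2 p < s.2.1 then pvSX image_shape.2.1 prediction_shape.2 p else s.2.1,
             if pvSY image_shape.1 prediction_shape.1 p < s.2.2.1 then pvSY image_shape.1 prediction_shape.1 p else s.2.2.1,
             if pvSX image_shape.2.1 prediction_shape.2 p > s.2.2.2.1 then pvSX image_shape.2.1 prediction_shape.2 p else s.2.2.2.1,
             if pvSY image_shape.1 prediction_shape.1 p > s.2.2.2.2 then pvSY image_shape.1 prediction_shape.1 p else s.2.2.2.2))
          ([[pvSX image_shape.2.1 prediction_shape.2 (PySem.List.pyGetD poly 0 []),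
             pvSY image_shape.1 prediction_shape.1 (PySem.List.pyGetD poly 0 [])]],
           pvSX image_shape.2.1 prediction_shape.2 (PySem.List.pyGetD poly 0 []),
           pvSY image_shape.1 prediction_shape.1 (PySem.List.pyGetD poly 0 []),
           pvSX image_shape.2.1 prediction_shape.2 (PySem.List.pyGetD poly 0 []),
           pvSY image_shape.1 prediction_shape.1 (PySem.List.pyGetD poly 0 []))
        (acc.1 ++ [st.1], acc.2 ++ [[st.2.1, st.2.2.1, st.2.2.2.1, st.2.2.2.2]])) ([], [])
  rw [PySem.List.foldl_append_singleton_eq_map, List.nil_append,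
    outer_fold_eq image_shape.2.1 prediction_shape.2 image_shape.1 prediction_shape.1 coordinates
      (fun poly hm => (hpoly poly hm).1) [] [],
    List.nil_append, List.nil_append, bbox_map]

-- ===== VERDICT (by name: the statement is the Claim_ definition above) =====
theorem upsample_coordinates_spec : Claim_equal_upsample_coordinates := by
  intro coordinates ps is _ hpre
  exact upsample_coordinates_spec' coordinates ps is hpre
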